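-- pv_equiv track=rewrite | github.com/antonegas/advent-of-code | day13/main.py | num_mirror_col_smudges
-- ===== SOURCE A (Python) =====
-- def get_col(pattern, index):
--     return "".join(x[index] for x in pattern)
--
-- def col_matches(pattern, center: int, offset: int):
--     return get_col(pattern, center - offset) == get_col(pattern, center + 1 + offset)
--
-- def col_matches_smudge(pattern, center: int, offset: int):
--     col1 = get_col(pattern, center - offset)
--     col2 = get_col(pattern, center + 1 + offset)
--     return sum([a == b for a, b in zip(col1, col2)]) == len(col1) - 1
--
-- def num_mirror_col_smudges(pattern, col):
--     res = 0
--     num_iter = min(col, len(pattern[0]) - col - 2) + 1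
--     for offset in range(num_iter):
--         if not col_matches(pattern, col, offset):
--             if col_matches_smudge(pattern, col, offset):
--                 res += 1
--             else:
--                 return -1
--     return res
-- ===== SOURCE B (Python) =====
-- def num_mirror_col_smudges(pattern, col):
--     num_iter = min(col, len(pattern[0]) - col - 2) + 1
--     counts = [0] * max(num_iter, 0)
--     for row in pattern:
--         counts = [c + (row[col - o] != row[col + 1 + o]) for o, c in enumerate(counts)]
--     if any(c >= 2 for c in counts):
--         return -1
--     return sum(counts)
-- ===== Notes on version B (the rewrite author's own statement) =====
-- stated objective: alternative
-- what changed: Instead of extracting and comparing whole column strings offset-by-offset with an early return, B makes a single row-major pass maintaining a per-offset mismatch counter list, then returns -1 if any counter reaches 2 and the sum of the counters otherwise.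
-- outside the precondition, e.g. on num_mirror_col_smudges(['abab', 'abab', 'aba'], 1): A returns -1, B raises IndexError
import Mathlib
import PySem

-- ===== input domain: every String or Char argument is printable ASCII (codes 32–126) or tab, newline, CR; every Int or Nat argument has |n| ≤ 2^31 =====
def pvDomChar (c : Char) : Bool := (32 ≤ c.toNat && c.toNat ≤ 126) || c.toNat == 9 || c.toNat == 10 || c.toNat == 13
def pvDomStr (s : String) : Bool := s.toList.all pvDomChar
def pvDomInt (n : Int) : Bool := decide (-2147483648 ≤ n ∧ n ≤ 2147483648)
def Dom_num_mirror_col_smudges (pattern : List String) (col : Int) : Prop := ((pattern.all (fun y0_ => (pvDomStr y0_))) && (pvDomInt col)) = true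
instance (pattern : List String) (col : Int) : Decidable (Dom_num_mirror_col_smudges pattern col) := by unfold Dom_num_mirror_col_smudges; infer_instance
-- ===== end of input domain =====

-- B replaces A's column-extraction-and-compare with a single row-major pass over a per-offset
-- mismatch-counter list (no early return); structurally different, same cost (objective: alternative).

-- ===== PORT A =====
-- x[index] for a string row; the default ' ' is never reached under Pre_ (out-of-range = IndexError)
def pvChr (row : String) (i : Int) : Char := (PySem.Str.pyGet? row i).getD ' '

def pvGetCol (pattern : List String) (index : Int) : List Char :=
  pattern.map (fun x => pvChr x index)

def pvColMatches (pattern : List String) (center offset : Int) : Bool :=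
  pvGetCol pattern (center - offset) == pvGetCol pattern (center + 1 + offset)

def pvColMatchesSmudge (pattern : List String) (center offset : Int) : Bool :=
  let col1 := pvGetCol pattern (center - offset)
  let col2 := pvGetCol pattern (center + 1 + offset)
  ((col1.zip col2).map (fun p => if p.1 == p.2 then (1 : Int) else 0)).sum == (col1.length : Int) - 1

-- the for-loop with its early 'return -1'
def pvALoop (pattern : List String) (col : Int) : List Int → Int → Int
  | [], res => res
  | o :: rest, res =>
    if !(pvColMatches pattern col o) then
      if pvColMatchesSmudge pattern col o then pvALoop pattern col rest (res + 1)
      else -1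
    else pvALoop pattern col rest res

def num_mirror_col_smudges (pattern : List String) (col : Int) : Int :=
  let num_iter := min col (PySem.Str.len (pattern.headD "") - col - 2) + 1
  pvALoop pattern col (PySem.List.pyRange 0 num_iter 1) 0

-- ===== PORT B =====
-- [0] * max(num_iter, 0): Int.toNat clamps negatives to 0 exactly like Python list repetition
def num_mirror_col_smudges_alt (pattern : List String) (col : Int) : Int :=
  let num_iter := min col (PySem.Str.len (pattern.headD "") - col - 2) + 1
  let counts := pattern.foldl
    (fun cs row => (PySem.List.enumerate cs).map
      (fun oc => oc.2 + (if pvChr row (col - oc.1) != pvChr row (col + 1 + oc.1) then (1 : Int) else 0)))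
    (List.replicate num_iter.toNat (0 : Int))
  if counts.any (fun c => decide (2 ≤ c)) then -1 else counts.foldl (· + ·) 0

-- ===== PRECONDITION & SPEC =====
-- Pre_ excludes the empty pattern (A raises IndexError at pattern[0]) and patterns in which a
-- compared cell is out of range for some row: there A either raises IndexError or returns -1 by
-- early exit before touching the short row, while B's full row-major scan raises IndexError.
def Pre_num_mirror_col_smudges (pattern : List String) (col : Int) : Prop :=
  pattern ≠ [] ∧
  (min col (PySem.Str.len (pattern.headD "") - col - 2) + 1 ≤ 0 ∨
   ∀ r ∈ pattern, col + (min col (PySem.Str.len (pattern.headD "") - col - 2) + 1) < PySem.Str.len r)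
instance (pattern : List String) (col : Int) : Decidable (Pre_num_mirror_col_smudges pattern col) := by
  unfold Pre_num_mirror_col_smudges; infer_instance

def pvWitness_num_mirror_col_smudges : List String × Int := (["#.##.", "#.#.."], 1)

def Spec_num_mirror_col_smudges (pattern : List String) (col : Int) (out : Int) : Prop := out = num_mirror_col_smudges_alt pattern col
instance (pattern : List String) (col : Int) (out : Int) : Decidable (Spec_num_mirror_col_smudges pattern col out) := by unfold Spec_num_mirror_col_smudges; infer_instance

-- ===== CLAIM (what is proved, stated in full; the proofs are below) =====
def Claim_equal_num_mirror_col_smudges : Prop := ∀ (pattern : List String) (col : Int), Dom_num_mirror_col_smudges pattern col → Pre_num_mirror_col_smudges pattern col → Spec_num_mirror_col_smudges pattern col (num_mirror_col_smudges pattern col)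

-- ===== LEMMAS AND PROOFS =====

-- number of rows in which the two mirrored cells at this offset differ (shared characterisation)
def pvMis (pattern : List String) (col o : Int) : Nat :=
  pattern.countP (fun row => pvChr row (col - o) != pvChr row (col + 1 + o))

theorem pvColMatches_iff (pattern : List String) (col o : Int) :
    pvColMatches pattern col o = true ↔ pvMis pattern col o = 0 := by
  induction pattern with
  | nil => simp [pvColMatches, pvGetCol, pvMis]
  | cons r P ih =>
    simp only [pvColMatches, pvGetCol, pvMis, List.map_cons, List.countP_cons] at *
    by_cases h : pvChr r (col - o) = pvChr r (col + 1 + o) <;> simp [h] at *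

theorem pvSmudge_sum (pattern : List String) (col o : Int) :
    ((((pvGetCol pattern (col - o)).zip (pvGetCol pattern (col + 1 + o))).map
        (fun p => if p.1 == p.2 then (1 : Int) else 0)).sum)
      = (pattern.length : Int) - (pvMis pattern col o : Int) := by
  induction pattern with
  | nil => simp [pvGetCol, pvMis]
  | cons r P ih =>
    simp only [pvGetCol, pvMis, List.map_cons, List.zip_cons_cons, List.sum_cons,
      List.countP_cons] at *
    by_cases h : pvChr r (col - o) = pvChr r (col + 1 + o) <;> simp [h] at * <;> omega

theorem pvColMatchesSmudge_iff (pattern : List String) (col o : Int) :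
    pvColMatchesSmudge pattern col o = true ↔ pvMis pattern col o = 1 := by
  have hs := pvSmudge_sum pattern col o
  have hlen : (pvGetCol pattern (col - o)).length = pattern.length := by
    simp [pvGetCol]
  have hle : pvMis pattern col o ≤ pattern.length := List.countP_le_length
  simp only [pvColMatchesSmudge, beq_iff_eq] at hs ⊢
  rw [hs, hlen]
  omega

theorem pvALoop_char (pattern : List String) (col : Int) (offs : List Int) (res : Int) :
    pvALoop pattern col offs res =
      if offs.any (fun o => decide ((2 : Int) ≤ (pvMis pattern col o : Int))) then -1
      else res + (offs.map (fun o => (pvMis pattern col o : Int))).sum := by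
  induction offs generalizing res with
  | nil => simp [pvALoop]
  | cons o rest ih =>
    simp only [pvALoop, List.any_cons, List.map_cons, List.sum_cons]
    by_cases h2 : 2 ≤ pvMis pattern col o
    · have hm : ¬ (pvColMatches pattern col o = true) := by
        rw [pvColMatches_iff]; omega
      have hsm : ¬ (pvColMatchesSmudge pattern col o = true) := by
        rw [pvColMatchesSmudge_iff]; omega
      simp [hm, hsm, h2]
    · interval_cases hmv : pvMis pattern col o
      · have hm : pvColMatches pattern col o = true := by rw [pvColMatches_iff]; omega
        simp [hm, ih]
      · have hm : ¬ (pvColMatches pattern col o = true) := by rw [pvColMatches_iff]; omega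
        have hsm : pvColMatchesSmudge pattern col o = true := by
          rw [pvColMatchesSmudge_iff]; omega
        simp only [hm] at *
        simp [hsm, ih]
        split <;> [rfl; ring]

theorem pvEnumerate_map_pyRange_aux (g : Int → Int) (b : Int) :
    ∀ (n : Nat) (a : Int), (b - a).toNat = n →
      PySem.List.enumerate ((PySem.List.pyRange a b 1).map g) a
        = (PySem.List.pyRange a b 1).map (fun o => (o, g o)) := by
  intro n
  induction n with
  | zero =>
    intro a h
    rw [PySem.List.pyRange_one_eq_nil (by omega)]
    simp
  | succ n ih =>
    intro a h
    rw [PySem.List.pyRange_one_cons (by omega)]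
    simp only [List.map_cons, PySem.List.enumerate_cons]
    rw [ih (a + 1) (by omega)]

theorem pvEnumerate_map_pyRange (g : Int → Int) (a b : Int) :
    PySem.List.enumerate ((PySem.List.pyRange a b 1).map g) a
      = (PySem.List.pyRange a b 1).map (fun o => (o, g o)) :=
  pvEnumerate_map_pyRange_aux g b (b - a).toNat a rfl

theorem pvCounts_foldl (col : Int) (n : Int) (P : List String) :
    ∀ g : Int → Int,
      P.foldl
        (fun cs row => (PySem.List.enumerate cs).map
          (fun oc => oc.2 + (if pvChr row (col - oc.1) != pvChr row (col + 1 + oc.1) then (1 : Int) else 0)))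
        ((PySem.List.pyRange 0 n 1).map g)
      = (PySem.List.pyRange 0 n 1).map (fun o => g o + (pvMis P col o : Int)) := by
  induction P with
  | nil => intro g; simp [pvMis]
  | cons row P ih =>
    intro g
    simp only [List.foldl_cons, pvEnumerate_map_pyRange, List.map_map]
    rw [ih]
    apply List.map_congr_left
    intro o _
    simp only [Function.comp, pvMis, List.countP_cons]
    by_cases h : (pvChr row (col - o) != pvChr row (col + 1 + o)) = true <;>
      simp [h] <;> ring

-- ===== VERDICT (by name: the statement is the Claim_ definition above) =====
theorem num_mirror_col_smudges_spec : Claim_equal_num_mirror_col_smudges := by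
  intro pattern col _ _
  unfold Spec_num_mirror_col_smudges
  simp only [num_mirror_col_smudges, num_mirror_col_smudges_alt]
  generalize min col (PySem.Str.len (pattern.headD "") - col - 2) + 1 = n
  have hlenr : (PySem.List.pyRange 0 n 1).length = n.toNat := by
    rw [PySem.List.length_pyRange_one]; norm_num
  have hrep : List.replicate n.toNat (0 : Int)
      = (PySem.List.pyRange 0 n 1).map (fun _ => (0 : Int)) := by
    rw [← hlenr, List.map_const']
  rw [hrep, pvCounts_foldl, pvALoop_char]
  simp only [List.any_map, Function.comp_def, zero_add]
  rw [List.sum_eq_foldl]
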